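-- pv_equiv track=rewrite | github.com/akshayyeluri/sonnets | helper.py | parse_seqs
-- ===== SOURCE A (Python) =====
-- def parse_seqs(seqs):
--     obs_counter = 0
--     obs = []
--     obs_map = {}
--
--     for seq in seqs:
--         obs_elem = []
--         for word in seq.split():
--             if word not in obs_map:
--                 # Add unique words to the observations map.
--                 obs_map[word] = obs_counter
--                 obs_counter += 1
--             # Add the encoded word.
--             obs_elem.append(obs_map[word])
--         # Add the encoded sequence.
--         obs.append(obs_elem)
--
--     return obs, obs_map
-- ===== SOURCE B (Python) =====
-- def parse_seqs(seqs):
--     # Pass 1: build the vocabulary in first-appearance order.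
--     obs_map = {}
--     for seq in seqs:
--         for word in seq.split():
--             if word not in obs_map:
--                 obs_map[word] = len(obs_map)
--     # Pass 2: encode every sequence against the finished map.
--     obs = [[obs_map[w] for w in seq.split()] for seq in seqs]
--     return obs, obs_map
-- ===== Notes on version B (the rewrite author's own statement) =====
-- stated objective: simpler
-- what changed: Replaces the single interleaved counter/encode loop by two separate passes: one that only builds the vocabulary (ids = len(obs_map) at first appearance), then a comprehension that encodes every sequence against the finished map.
import Mathlib
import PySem

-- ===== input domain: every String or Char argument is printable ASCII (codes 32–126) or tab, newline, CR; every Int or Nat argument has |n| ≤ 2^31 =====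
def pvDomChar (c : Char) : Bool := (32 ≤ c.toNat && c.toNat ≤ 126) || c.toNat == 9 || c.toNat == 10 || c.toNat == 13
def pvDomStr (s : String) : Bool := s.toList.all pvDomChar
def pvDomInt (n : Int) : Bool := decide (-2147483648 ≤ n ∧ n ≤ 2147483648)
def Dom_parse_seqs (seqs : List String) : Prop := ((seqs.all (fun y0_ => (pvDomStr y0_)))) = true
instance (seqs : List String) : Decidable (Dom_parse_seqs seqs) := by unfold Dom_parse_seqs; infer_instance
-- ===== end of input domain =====

-- B separates A's interleaved counter/encode loop into two passes: build the vocabulary first, then encode; same cost, simpler shape.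


-- ===== PORT A =====
-- inner loop body: conditional fresh insert + counter bump, then append the encoded word
-- (obs_map[word] cannot fail here — the key was just ensured present — so getD's default 0 is never used)
def pvAInner (st : Int × List Int × PySem.Dict String Int) (w : String) :
    Int × List Int × PySem.Dict String Int :=
  let cm := if st.2.2.contains w then (st.1, st.2.2) else (st.1 + 1, st.2.2.insert w st.1)
  (cm.1, st.2.1 ++ [cm.2.getD w 0], cm.2)

def pvAOuter (st : Int × List (List Int) × PySem.Dict String Int) (seq : String) :
    Int × List (List Int) × PySem.Dict String Int :=
  let r := (PySem.Str.split₀ seq).foldl pvAInner (st.1, [], st.2.2)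
  (r.1, st.2.1 ++ [r.2.1], r.2.2)

def parse_seqs (seqs : List String) : List (List Int) × (List (String × Int)) :=
  let r := seqs.foldl pvAOuter (0, [], PySem.Dict.empty)
  (r.2.1, r.2.2.items)

-- ===== PORT B =====
-- pass 1: vocabulary only, id = current map size at first appearance
def pvBStep (m : PySem.Dict String Int) (w : String) : PySem.Dict String Int :=
  if m.contains w then m else m.insert w (m.size : Int)

def pvBMap (seqs : List String) : PySem.Dict String Int :=
  seqs.foldl (fun m seq => (PySem.Str.split₀ seq).foldl pvBStep m) PySem.Dict.empty

def parse_seqs_alt (seqs : List String) : List (List Int) × (List (String × Int)) :=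
  let m := pvBMap seqs
  (seqs.map (fun seq => (PySem.Str.split₀ seq).map (fun w => m.getD w 0)), m.items)

-- ===== PRECONDITION & SPEC =====
def Spec_parse_seqs (seqs : List String) (out : List (List Int) × (List (String × Int))) : Prop := out = parse_seqs_alt seqs
instance (seqs : List String) (out : List (List Int) × (List (String × Int))) : Decidable (Spec_parse_seqs seqs out) := by unfold Spec_parse_seqs; infer_instance

-- ===== CLAIM (what is proved, stated in full; the proofs are below) =====
def Claim_equal_parse_seqs : Prop := ∀ (seqs : List String), Dom_parse_seqs seqs → Spec_parse_seqs seqs (parse_seqs seqs)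

-- ===== LEMMAS AND PROOFS =====

-- "m is a submap of M": every binding of m survives in M (A's map only ever gains fresh keys)
def pvSub (m M : PySem.Dict String Int) : Prop :=
  ∀ k v, m.get? k = some v → M.get? k = some v

theorem pvSub_refl (m : PySem.Dict String Int) : pvSub m m := fun _ _ h => h

theorem pvSub_insert_fresh (m : PySem.Dict String Int) (w : String) (c : Int)
    (h : m.contains w = false) : pvSub m (m.insert w c) := by
  intro k v hk
  have hne : k ≠ w := by
    intro he; subst he
    rw [(PySem.Dict.get?_eq_none_iff_contains m k).2 h] at hk; simp at hk
  rw [PySem.Dict.get?_insert_of_ne _ _ hne]; exact hk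

-- main invariant of the inner word loop
theorem pvInner_spec (ws : List String) :
    ∀ (c : Int) (elem : List Int) (m : PySem.Dict String Int), c = (m.size : Int) →
    (ws.foldl pvAInner (c, elem, m)).2.2 = ws.foldl pvBStep m ∧
    pvSub m (ws.foldl pvAInner (c, elem, m)).2.2 ∧
    (ws.foldl pvAInner (c, elem, m)).1 = ((ws.foldl pvAInner (c, elem, m)).2.2.size : Int) ∧
    (∀ M, pvSub (ws.foldl pvAInner (c, elem, m)).2.2 M →
      (ws.foldl pvAInner (c, elem, m)).2.1 = elem ++ ws.map (fun w => M.getD w 0)) := by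
  induction ws with
  | nil =>
      intro c elem m hc
      exact ⟨rfl, pvSub_refl m, hc, fun M _ => by simp⟩
  | cons w ws ih =>
      intro c elem m hc
      by_cases h : m.contains w
      · have hstep : pvAInner (c, elem, m) w = (c, elem ++ [m.getD w 0], m) := by
          simp [pvAInner, h]
        have hget : ∃ v, m.get? w = some v := by
          rcases hv : m.get? w with _ | v
          · rw [PySem.Dict.get?_eq_none_iff_contains] at hv; rw [h] at hv; cases hv
          · exact ⟨v, rfl⟩
        obtain ⟨v, hv⟩ := hget
        obtain ⟨h1, h2, h3, h4⟩ := ih c (elem ++ [m.getD w 0]) m hc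
        simp only [List.foldl_cons, hstep]
        refine ⟨?_, ?_, h3, ?_⟩
        · rw [h1]; have : pvBStep m w = m := by simp [pvBStep, h]
          rw [this]
        · exact fun k v hk => h2 k v hk
        · intro M hM
          have hMv : M.get? w = some v := hM w v (h2 w v hv)
          have heq : m.getD w 0 = M.getD w 0 := by
            rw [PySem.Dict.getD_eq_get?_getD, PySem.Dict.getD_eq_get?_getD, hv, hMv]
          rw [h4 M hM, heq]; simp
      · have h' : m.contains w = false := by simpa using h
        have hstep : pvAInner (c, elem, m) w
            = (c + 1, elem ++ [c], m.insert w c) := by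
          simp [pvAInner, h', PySem.Dict.getD_insert_self]
        have hsize : c + 1 = (((m.insert w c).size : Nat) : Int) := by
          rw [PySem.Dict.size_insert]; simp [h', hc]
        obtain ⟨h1, h2, h3, h4⟩ := ih (c + 1) (elem ++ [c]) (m.insert w c) hsize
        have hsubm : pvSub m (m.insert w c) := pvSub_insert_fresh m w c h'
        simp only [List.foldl_cons, hstep]
        refine ⟨?_, ?_, h3, ?_⟩
        · rw [h1]; have : pvBStep m w = m.insert w c := by
            simp [pvBStep, h', hc]
          rw [this]
        · exact fun k v hk => h2 k v (hsubm k v hk)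
        · intro M hM
          have hins : (m.insert w c).get? w = some c := PySem.Dict.get?_insert_self m w c
          have hMw : M.get? w = some c := hM w c (h2 w c hins)
          have hcM : M.getD w 0 = c := by
            rw [PySem.Dict.getD_eq_get?_getD, hMw]; rfl
          rw [h4 M hM]; simp [hcM]

-- main invariant of the outer sequence loop
theorem pvOuter_spec (seqs : List String) :
    ∀ (c : Int) (obs : List (List Int)) (m : PySem.Dict String Int), c = (m.size : Int) →
    (seqs.foldl pvAOuter (c, obs, m)).2.2
      = seqs.foldl (fun m seq => (PySem.Str.split₀ seq).foldl pvBStep m) m ∧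
    pvSub m (seqs.foldl pvAOuter (c, obs, m)).2.2 ∧
    (seqs.foldl pvAOuter (c, obs, m)).1 = ((seqs.foldl pvAOuter (c, obs, m)).2.2.size : Int) ∧
    (∀ M, pvSub (seqs.foldl pvAOuter (c, obs, m)).2.2 M →
      (seqs.foldl pvAOuter (c, obs, m)).2.1
        = obs ++ seqs.map (fun seq => (PySem.Str.split₀ seq).map (fun w => M.getD w 0))) := by
  induction seqs with
  | nil =>
      intro c obs m hc
      exact ⟨rfl, pvSub_refl m, hc, fun M _ => by simp⟩
  | cons seq seqs ih =>
      intro c obs m hc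
      obtain ⟨i1, i2, i3, i4⟩ := pvInner_spec (PySem.Str.split₀ seq) c [] m hc
      set r := (PySem.Str.split₀ seq).foldl pvAInner (c, [], m) with hr
      have hstep : pvAOuter (c, obs, m) seq = (r.1, obs ++ [r.2.1], r.2.2) := rfl
      obtain ⟨h1, h2, h3, h4⟩ := ih r.1 (obs ++ [r.2.1]) r.2.2 i3
      refine ⟨?_, ?_, ?_, ?_⟩
      · simp only [List.foldl_cons, hstep]
        rw [h1, i1]
      · simp only [List.foldl_cons, hstep]
        exact fun k v hk => h2 k v (i2 k v hk)
      · simpa [List.foldl_cons, hstep] using h3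
      · intro M hM
        have hsubrM : pvSub r.2.2 M := fun k v hk => hM k v (h2 k v hk)
        simp only [List.foldl_cons, hstep]
        rw [h4 M hM, i4 M hsubrM]
        simp

-- ===== VERDICT (by name: the statement is the Claim_ definition above) =====
theorem parse_seqs_spec : Claim_equal_parse_seqs := by
  intro seqs _
  unfold Spec_parse_seqs parse_seqs parse_seqs_alt pvBMap
  obtain ⟨h1, _, _, h4⟩ := pvOuter_spec seqs 0 [] PySem.Dict.empty (by simp)
  set r := seqs.foldl pvAOuter (0, [], PySem.Dict.empty) with hr
  have hM : pvSub r.2.2 (seqs.foldl (fun m seq => (PySem.Str.split₀ seq).foldl pvBStep m)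
      PySem.Dict.empty) := by rw [← h1]; exact pvSub_refl _
  refine Prod.ext ?_ ?_
  · simpa using h4 _ hM
  · simpa using congrArg PySem.Dict.items h1
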